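-- pv_equiv track=rewrite | github.com/dreeko/aoc | day4/day4-1.py | fn_search_and_mark
-- ===== SOURCE A (Python) =====
-- def fn_check_complete(marked, row, col):
--     return all((marked[row][0], marked[row][1], marked[row][2], marked[row][3], marked[row][4])) or \
--         all((marked[0][col], marked[1][col], marked[2]
--              [col], marked[3][col], marked[4][col]))
--
-- def fn_search_and_mark(board, draws, min_complete):
--     marked = [[False for i in range(5)] for j in range(5)]
--     completed_in = 0
--     for draw in draws:
--         completed_in += 1
--         if completed_in >= min_complete:
--             return 100, board, marked, draws[-1]
--         for i in range(0, len(board)):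
--             for j in range(0, len(board[i])):
--                 if board[i][j] == draw:
--                     marked[i][j] = True
--                     if fn_check_complete(marked, i, j):
--                         return completed_in, board, marked, draws[completed_in]
--     return 100, board, marked, draws[-1]
-- ===== SOURCE B (Python) =====
-- def fn_search_and_mark(board, draws, min_complete):
--     # Index each board value by its (row, col) positions in row-major order,
--     # and keep per-row / per-column counts of marked cells.
--     positions = {}
--     for i in range(len(board)):
--         for j in range(len(board[i])):
--             v = board[i][j]
--             positions.setdefault(v, []).append((i, j))
--     marked = [[False] * 5 for _ in range(5)]
--     row_counts = [0] * 5
--     col_counts = [0] * 5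
--     completed_in = 0
--     for draw in draws:
--         completed_in += 1
--         if completed_in >= min_complete:
--             return 100, board, marked, draws[-1]
--         for (i, j) in positions.get(draw, []):
--             if not marked[i][j]:
--                 marked[i][j] = True
--                 row_counts[i] += 1
--                 col_counts[j] += 1
--             if row_counts[i] == 5 or col_counts[j] == 5:
--                 return completed_in, board, marked, draws[completed_in]
--     return 100, board, marked, draws[-1]
-- ===== Notes on version B (the rewrite author's own statement) =====
-- stated objective: alternative
-- what changed: B builds a value-to-(row,col)-positions index of the board once and maintains per-row/per-column marked-cell counters, so each draw touches only its matching cells and each completion test is two counter comparisons, instead of A's full board rescan per draw and 10-cell all() test per mark.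
import Mathlib
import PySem

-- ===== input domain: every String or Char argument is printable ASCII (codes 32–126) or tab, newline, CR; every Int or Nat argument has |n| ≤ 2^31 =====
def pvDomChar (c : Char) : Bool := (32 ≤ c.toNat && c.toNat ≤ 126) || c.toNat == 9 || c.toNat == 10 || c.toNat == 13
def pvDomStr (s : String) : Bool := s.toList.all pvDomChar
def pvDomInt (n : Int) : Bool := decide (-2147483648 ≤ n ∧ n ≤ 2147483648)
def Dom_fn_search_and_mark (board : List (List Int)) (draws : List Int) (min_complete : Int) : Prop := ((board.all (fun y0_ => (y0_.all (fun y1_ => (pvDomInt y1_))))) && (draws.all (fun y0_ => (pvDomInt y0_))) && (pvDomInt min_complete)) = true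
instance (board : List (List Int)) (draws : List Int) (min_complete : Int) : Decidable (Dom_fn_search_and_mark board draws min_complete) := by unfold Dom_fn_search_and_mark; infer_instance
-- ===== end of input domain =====

-- B replaces A's per-draw full-board rescan and 10-cell all() completion test by a
-- value→positions index built once plus maintained per-row/per-column marked counters (objective: alternative).

-- ===== PORT A =====
-- marked[r][c]; out-of-range reads default to false/[] — unreachable under Pre_ (Python would raise IndexError there)
def pvCell (m : List (List Bool)) (r c : Nat) : Bool := (m.getD r []).getD c false

def fnCheckComplete (m : List (List Bool)) (row col : Nat) : Bool :=
  (pvCell m row 0 && pvCell m row 1 && pvCell m row 2 && pvCell m row 3 && pvCell m row 4) ||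
  (pvCell m 0 col && pvCell m 1 col && pvCell m 2 col && pvCell m 3 col && pvCell m 4 col)

-- marked[i][j] = True  (List.set is a no-op out of range; Python raises there — excluded by Pre_)
def pvSetCell (m : List (List Bool)) (i j : Nat) : List (List Bool) :=
  m.set i ((m.getD i []).set j true)

-- inner 'for j in range(0, len(board[i]))' with the early returns as .error
def pvMarkRowA (row : List Int) (draw : Int) (i : Nat) :
    List Nat → List (List Bool) → Except (List (List Bool)) (List (List Bool))
  | [], m => .ok m
  | j :: js, m =>
    if row.getD j 0 = draw then
      let m' := pvSetCell m i j
      if fnCheckComplete m' i j then .error m' else pvMarkRowA row draw i js m'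
    else pvMarkRowA row draw i js m

-- 'for i in range(0, len(board))'
def pvMarkBoardA (board : List (List Int)) (draw : Int) :
    List Nat → List (List Bool) → Except (List (List Bool)) (List (List Bool))
  | [], m => .ok m
  | i :: is, m =>
    match pvMarkRowA (board.getD i []) draw i (List.range (board.getD i []).length) m with
    | .error m' => .error m'
    | .ok m' => pvMarkBoardA board draw is m'

-- 'for draw in draws' with completed_in
def pvLoopA (board : List (List Int)) (draws : List Int) (min_complete : Int) :
    List Int → Int → List (List Bool) → Int × List (List Int) × List (List Bool) × Int
  | [], _, m => (100, board, m, (PySem.List.pyGet? draws (-1)).getD 0)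
  | d :: ds, c, m =>
    if min_complete ≤ c + 1 then (100, board, m, (PySem.List.pyGet? draws (-1)).getD 0)
    else
      match pvMarkBoardA board d (List.range board.length) m with
      | .error m' => (c + 1, board, m', (PySem.List.pyGet? draws (c + 1)).getD 0)
      | .ok m' => pvLoopA board draws min_complete ds (c + 1) m'

def fn_search_and_mark (board : List (List Int)) (draws : List Int) (min_complete : Int) :
    Int × List (List Int) × List (List Bool) × Int :=
  pvLoopA board draws min_complete draws 0 (List.replicate 5 (List.replicate 5 false))

-- ===== PORT B =====
-- positions[v] = positions.get(v, []) + [(i, j)]  over all cells, row-major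
def pvPositions (board : List (List Int)) : PySem.Dict Int (List (Nat × Nat)) :=
  (List.range board.length).foldl (fun d i =>
    (List.range (board.getD i []).length).foldl (fun d j =>
      let v := (board.getD i []).getD j 0
      d.insert v (d.getD v [] ++ [(i, j)])) d) PySem.Dict.empty

-- 'for (i, j) in positions.get(draw, [])' with the win return as .error
def pvMarkPosB :
    List (Nat × Nat) → List (List Bool) × List Int × List Int →
    Except (List (List Bool) × List Int × List Int) (List (List Bool) × List Int × List Int)
  | [], st => .ok st
  | (i, j) :: ps, (m, rc, cc) =>
    let st' :=
      if pvCell m i j then (m, rc, cc)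
      else (pvSetCell m i j, rc.set i (rc.getD i 0 + 1), cc.set j (cc.getD j 0 + 1))
    if st'.2.1.getD i 0 == 5 || st'.2.2.getD j 0 == 5 then .error st' else pvMarkPosB ps st'

def pvLoopB (board : List (List Int)) (draws : List Int) (min_complete : Int)
    (pos : PySem.Dict Int (List (Nat × Nat))) :
    List Int → Int → List (List Bool) × List Int × List Int →
    Int × List (List Int) × List (List Bool) × Int
  | [], _, st => (100, board, st.1, (PySem.List.pyGet? draws (-1)).getD 0)
  | d :: ds, c, st =>
    if min_complete ≤ c + 1 then (100, board, st.1, (PySem.List.pyGet? draws (-1)).getD 0)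
    else
      match pvMarkPosB (pos.getD d []) st with
      | .error st' => (c + 1, board, st'.1, (PySem.List.pyGet? draws (c + 1)).getD 0)
      | .ok st' => pvLoopB board draws min_complete pos ds (c + 1) st'

def fn_search_and_mark_alt (board : List (List Int)) (draws : List Int) (min_complete : Int) :
    Int × List (List Int) × List (List Bool) × Int :=
  pvLoopB board draws min_complete (pvPositions board) draws 0
    (List.replicate 5 (List.replicate 5 false), List.replicate 5 0, List.replicate 5 0)

-- ===== PRECONDITION & SPEC =====
-- the draws A actually processes (those before the min_complete early return)
def pvPrefix (draws : List Int) (mc : Int) : List Int := draws.take (mc - 1).toNat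
-- the first five values of column j
def pvColVals (board : List (List Int)) (j : Nat) : List Int :=
  (List.range 5).map (fun i => (board.getD i []).getD j 0)
-- some bingo line (a row of ≥5 cells among the first 5 rows, or a column of the 5×5 area
-- present in every one of the first 5 rows) has all five of its values among draws[:n]
def pvCompleteBy (board : List (List Int)) (draws : List Int) (n : Nat) : Bool :=
  (List.range (min board.length 5)).any (fun i =>
    decide (5 ≤ (board.getD i []).length) &&
    ((board.getD i []).take 5).all (fun v => (draws.take n).contains v)) ||
  (decide (5 ≤ board.length) && (List.range 5).any (fun j =>
    (List.range 5).all (fun i => decide (j < (board.getD i []).length)) &&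
    (pvColVals board j).all (fun v => (draws.take n).contains v)))

-- Pre_ excludes exactly the inputs on which A raises IndexError: empty draws (draws[-1]); a board
-- cell outside the fixed 5×5 marked matrix whose value occurs among the processed draws (marking it
-- indexes past marked — conservative only in that a bingo reached before that mark would avert the
-- crash); and, when min_complete exceeds len(draws), a first bingo completing exactly on the LAST
-- draw, where draws[completed_in] overflows (some line complete over all draws but none over
-- draws[:-1]) — wins on any earlier draw stay inside Pre_ and are proved equal.
def Pre_fn_search_and_mark (board : List (List Int)) (draws : List Int) (min_complete : Int) : Prop :=
  draws ≠ [] ∧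
  (∀ i, i < board.length → ∀ j, j < (board.getD i []).length → 5 ≤ i ∨ 5 ≤ j →
    (board.getD i []).getD j 0 ∉ pvPrefix draws min_complete) ∧
  (min_complete ≤ (draws.length : Int) ∨
    pvCompleteBy board draws draws.length = false ∨
    pvCompleteBy board draws (draws.length - 1) = true)
instance (board : List (List Int)) (draws : List Int) (min_complete : Int) : Decidable (Pre_fn_search_and_mark board draws min_complete) := by
  unfold Pre_fn_search_and_mark; infer_instance

def pvWitness_fn_search_and_mark : List (List Int) × List Int × Int := ([[1, 2], [3, 4]], [1, 3, 2], 2)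

def Spec_fn_search_and_mark (board : List (List Int)) (draws : List Int) (min_complete : Int) (out : Int × List (List Int) × List (List Bool) × Int) : Prop := out = fn_search_and_mark_alt board draws min_complete
instance (board : List (List Int)) (draws : List Int) (min_complete : Int) (out : Int × List (List Int) × List (List Bool) × Int) : Decidable (Spec_fn_search_and_mark board draws min_complete out) := by unfold Spec_fn_search_and_mark; infer_instance

-- ===== CLAIM (what is proved, stated in full; the proofs are below) =====
def Claim_equal_fn_search_and_mark : Prop := ∀ (board : List (List Int)) (draws : List Int) (min_complete : Int), Dom_fn_search_and_mark board draws min_complete → Pre_fn_search_and_mark board draws min_complete → Spec_fn_search_and_mark board draws min_complete (fn_search_and_mark board draws min_complete)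

-- ===== LEMMAS AND PROOFS =====

-- proof-side vocabulary
def pvCountB (l : List Bool) : Int := (l.count true : Int)
def pvRcOf (m : List (List Bool)) : List Int := m.map pvCountB
def pvColList (m : List (List Bool)) (j : Nat) : List Bool := m.map (fun r => r.getD j false)
def pvCcOf (m : List (List Bool)) : List Int := (List.range 5).map (fun j => pvCountB (pvColList m j))
def pvShape (m : List (List Bool)) : Prop := m.length = 5 ∧ ∀ r ∈ m, r.length = 5
def pvInv (m : List (List Bool)) (rc cc : List Int) : Prop :=
  pvShape m ∧ rc = pvRcOf m ∧ cc = pvCcOf m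

def pvRowMatches (i : Nat) (row : List Int) (d : Int) : List (Nat × Nat) :=
  (List.range row.length).filterMap (fun j => if row.getD j 0 = d then some (i, j) else none)
def pvMatches (board : List (List Int)) (d : Int) : List (Nat × Nat) :=
  (List.range board.length).flatMap (fun i => pvRowMatches i (board.getD i []) d)

-- A's scan, restricted to the matching cells
def pvFoldA : List (Nat × Nat) → List (List Bool) → Except (List (List Bool)) (List (List Bool))
  | [], m => .ok m
  | (i, j) :: ps, m =>
    let m' := pvSetCell m i j
    if fnCheckComplete m' i j then .error m' else pvFoldA ps m'


-- small getD / set facts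
theorem pv_getD_eq_getElem {l : List (List Bool)} {i : Nat} (h : i < l.length) :
    l.getD i [] = l[i] := by
  simp [List.getD_eq_getElem?_getD, List.getElem?_eq_getElem h]

theorem pv_getD_set_self {l : List Bool} {j : Nat} (h : j < l.length) (a d : Bool) :
    (l.set j a).getD j d = a := by
  simp [List.getD_eq_getElem?_getD, h]

theorem pv_getD_set_ne {l : List Bool} {j k : Nat} (h : j ≠ k) (a d : Bool) :
    (l.set j a).getD k d = l.getD k d := by
  simp [List.getD_eq_getElem?_getD, h]

theorem pv_set_getD_self {l : List Bool} {j : Nat} (hj : j < l.length)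
    (h : l.getD j false = true) : l.set j true = l := by
  have hg : l[j] = true := by
    simpa [List.getD_eq_getElem?_getD, List.getElem?_eq_getElem hj] using h
  calc l.set j true = l.set j l[j] := by rw [hg]
    _ = l := List.set_getElem_self hj

theorem pv_count_set {l : List Bool} {j : Nat} (hj : j < l.length)
    (h : l.getD j false = false) : (l.set j true).count true = l.count true + 1 := by
  induction l generalizing j with
  | nil => simp at hj
  | cons a t ih =>
    cases j with
    | zero =>
      have : a = false := by simpa using h
      subst this
      simp
    | succ j =>
      have hj' : j < t.length := by simpa using hj
      have h' : t.getD j false = false := by simpa using h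
      simp only [List.set_cons_succ, List.count_cons, ih hj' h']
      ring

theorem pv_bool5 (b0 b1 b2 b3 b4 : Bool) :
    (b0 && b1 && b2 && b3 && b4)
      = ((((([b0, b1, b2, b3, b4] : List Bool).count true : Nat) : Int)) == 5) := by
  cases b0 <;> cases b1 <;> cases b2 <;> cases b3 <;> cases b4 <;> decide

theorem pv_list5 {α : Type} {l : List α} (h : l.length = 5) :
    ∃ a b c d e, l = [a, b, c, d, e] := by
  match l, h with
  | [a, b, c, d, e], _ => exact ⟨a, b, c, d, e, rfl⟩

theorem pv_row_len {m : List (List Bool)} (hs : pvShape m) {i : Nat} (hi : i < 5) :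
    (m.getD i []).length = 5 := by
  obtain ⟨hl, hr⟩ := hs
  have hi' : i < m.length := by omega
  rw [pv_getD_eq_getElem hi']
  exact hr _ (List.getElem_mem hi')

theorem pv_rc_getD {m : List (List Bool)} (hs : pvShape m) {i : Nat} (hi : i < 5) :
    (pvRcOf m).getD i 0 = pvCountB (m.getD i []) := by
  obtain ⟨hl, _⟩ := hs
  have hi' : i < m.length := by omega
  simp [pvRcOf, List.getD_eq_getElem?_getD, List.getElem?_map,
    List.getElem?_eq_getElem hi']

theorem pv_cc_getD (m : List (List Bool)) {j : Nat} (_hj : j < 5) :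
    (pvCcOf m).getD j 0 = pvCountB (pvColList m j) := by
  interval_cases j <;> simp [pvCcOf, List.range_succ]

theorem pv_colList_getD {m : List (List Bool)} (hl : m.length = 5) {i : Nat} (hi : i < 5)
    (j : Nat) : (pvColList m j).getD i false = (m.getD i []).getD j false := by
  have hi' : i < m.length := by omega
  simp [pvColList, List.getD_eq_getElem?_getD, List.getElem?_map,
    List.getElem?_eq_getElem hi']

-- the completion test, rephrased through the row/column counters
theorem pv_row_eq {m : List (List Bool)} (hs : pvShape m) {i : Nat} (hi : i < 5) :
    (pvCell m i 0 && pvCell m i 1 && pvCell m i 2 && pvCell m i 3 && pvCell m i 4)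
      = ((pvRcOf m).getD i 0 == 5) := by
  have hr := pv_row_len hs hi
  obtain ⟨a, b, c, d, e, hl⟩ := pv_list5 hr
  rw [pv_rc_getD hs hi]
  simp only [pvCell]
  rw [hl]
  simpa [pvCountB, List.getD] using pv_bool5 a b c d e

theorem pv_col_eq {m : List (List Bool)} (hs : pvShape m) {j : Nat} (hj : j < 5) :
    (pvCell m 0 j && pvCell m 1 j && pvCell m 2 j && pvCell m 3 j && pvCell m 4 j)
      = ((pvCcOf m).getD j 0 == 5) := by
  obtain ⟨r0, r1, r2, r3, r4, hm⟩ := pv_list5 hs.1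
  rw [pv_cc_getD m hj]
  subst hm
  simpa [pvCell, pvColList, pvCountB] using
    pv_bool5 (r0.getD j false) (r1.getD j false) (r2.getD j false) (r3.getD j false)
      (r4.getD j false)

theorem pv_check {m : List (List Bool)} (hs : pvShape m) {i j : Nat} (hi : i < 5)
    (hj : j < 5) :
    fnCheckComplete m i j = ((pvRcOf m).getD i 0 == 5 || (pvCcOf m).getD j 0 == 5) := by
  unfold fnCheckComplete
  rw [pv_row_eq hs hi, pv_col_eq hs hj]

-- marking an unmarked in-range cell: shape and the two counters
theorem pv_shape_set {m : List (List Bool)} (hs : pvShape m) {i j : Nat} (hi : i < 5)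
    (_hj : j < 5) : pvShape (pvSetCell m i j) := by
  obtain ⟨hl, hr⟩ := hs
  refine ⟨by simp [pvSetCell, hl], ?_⟩
  intro r hrm
  rcases List.mem_or_eq_of_mem_set hrm with h | h
  · exact hr _ h
  · rw [h, List.length_set]
    exact pv_row_len ⟨hl, hr⟩ hi

theorem pv_rc_set {m : List (List Bool)} (hs : pvShape m) {i j : Nat} (hi : i < 5)
    (hj : j < 5) (hc : pvCell m i j = false) :
    (pvRcOf m).set i ((pvRcOf m).getD i 0 + 1) = pvRcOf (pvSetCell m i j) := by
  have hrl : (m.getD i []).length = 5 := pv_row_len hs hi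
  have hcnt : ((m.getD i []).set j true).count true = (m.getD i []).count true + 1 :=
    pv_count_set (by omega) hc
  rw [pv_rc_getD hs hi]
  simp only [pvRcOf, pvSetCell, List.map_set]
  congr 1
  show pvCountB (m.getD i []) + 1 = pvCountB ((m.getD i []).set j true)
  simp only [pvCountB, hcnt]
  push_cast
  ring

theorem pv_colList_set_ne {m : List (List Bool)} (hs : pvShape m) {i j k : Nat}
    (hi : i < 5) (hk : j ≠ k) : pvColList (pvSetCell m i j) k = pvColList m k := by
  have hi' : i < m.length := by have := hs.1; omega
  have hlen : i < (m.map (fun r => r.getD k false)).length := by simpa using hi'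
  simp only [pvColList, pvSetCell, List.map_set]
  rw [pv_getD_set_ne hk]
  have hval : (m.map (fun r => r.getD k false))[i]'hlen = (m.getD i []).getD k false := by
    rw [List.getElem_map, pv_getD_eq_getElem hi']
  rw [← hval]
  exact List.set_getElem_self hlen

theorem pv_colList_set_self {m : List (List Bool)} (hs : pvShape m) {i j : Nat}
    (hi : i < 5) (hj : j < 5) :
    pvColList (pvSetCell m i j) j = (pvColList m j).set i true := by
  have hrl : (m.getD i []).length = 5 := pv_row_len hs hi
  simp only [pvColList, pvSetCell, List.map_set]
  rw [pv_getD_set_self (by omega)]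

theorem pv_cc_set {m : List (List Bool)} (hs : pvShape m) {i j : Nat} (hi : i < 5)
    (hj : j < 5) (hc : pvCell m i j = false) :
    (pvCcOf m).set j ((pvCcOf m).getD j 0 + 1) = pvCcOf (pvSetCell m i j) := by
  have hl : m.length = 5 := hs.1
  apply List.ext_getElem
  · simp [pvCcOf]
  intro k hk1 hk2
  have hk : k < 5 := by simpa [pvCcOf] using hk2
  have hgetcc : ∀ (mm : List (List Bool)), (pvCcOf mm)[k]'(by simp [pvCcOf]; omega)
      = pvCountB (pvColList mm k) := by
    intro mm
    have := pv_cc_getD mm hk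
    simpa [List.getD_eq_getElem?_getD, List.getElem?_eq_getElem
      (show k < (pvCcOf mm).length by simp [pvCcOf]; omega)] using this
  rw [List.getElem_set, hgetcc (pvSetCell m i j)]
  by_cases hjk : j = k
  · subst hjk
    rw [if_pos rfl, pv_colList_set_self hs hi hj, pv_cc_getD m hj]
    have hcl : (pvColList m j).getD i false = false := by
      rw [pv_colList_getD hl hi]; exact hc
    have hcnt : ((pvColList m j).set i true).count true = (pvColList m j).count true + 1 :=
      pv_count_set (by simp [pvColList]; omega) hcl
    simp only [pvCountB, hcnt]
    push_cast
    ring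
  · rw [if_neg hjk, hgetcc m, pv_colList_set_ne hs hi hjk]

-- A's cell scan restricted to matching cells
theorem pv_foldA_append (xs ys : List (Nat × Nat)) (m : List (List Bool)) :
    pvFoldA (xs ++ ys) m = match pvFoldA xs m with
      | .error e => .error e
      | .ok m' => pvFoldA ys m' := by
  induction xs generalizing m with
  | nil => simp [pvFoldA]
  | cons p ps ih =>
    obtain ⟨i, j⟩ := p
    simp only [List.cons_append, pvFoldA]
    split <;> simp [ih]

theorem pv_markRowA_eq (row : List Int) (d : Int) (i : Nat) (js : List Nat)
    (m : List (List Bool)) :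
    pvMarkRowA row d i js m
      = pvFoldA (js.filterMap (fun j => if row.getD j 0 = d then some (i, j) else none)) m := by
  induction js generalizing m with
  | nil => rfl
  | cons j js ih =>
    unfold pvMarkRowA
    by_cases h : row.getD j 0 = d
    · rw [if_pos h,
        show (j :: js).filterMap (fun j => if row.getD j 0 = d then some (i, j) else none)
          = (i, j) :: js.filterMap (fun j => if row.getD j 0 = d then some (i, j) else none) by
            rw [List.filterMap_cons, if_pos h]]
      have hF : pvFoldA ((i, j) :: js.filterMap
            (fun j => if row.getD j 0 = d then some (i, j) else none)) m
          = if fnCheckComplete (pvSetCell m i j) i j then .error (pvSetCell m i j)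
            else pvFoldA (js.filterMap (fun j => if row.getD j 0 = d then some (i, j) else none))
              (pvSetCell m i j) := rfl
      rw [hF]
      by_cases hchk : fnCheckComplete (pvSetCell m i j) i j
      · rw [if_pos hchk, if_pos hchk]
      · rw [if_neg hchk, if_neg hchk, ih]
    · rw [if_neg h,
        show (j :: js).filterMap (fun j => if row.getD j 0 = d then some (i, j) else none)
          = js.filterMap (fun j => if row.getD j 0 = d then some (i, j) else none) by
            rw [List.filterMap_cons, if_neg h]]
      exact ih m

theorem pv_markBoardA_eq (board : List (List Int)) (d : Int) (is : List Nat)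
    (m : List (List Bool)) :
    pvMarkBoardA board d is m
      = pvFoldA (is.flatMap (fun i => pvRowMatches i (board.getD i []) d)) m := by
  induction is generalizing m with
  | nil => rfl
  | cons i is ih =>
    have hrow : pvMarkRowA (board.getD i []) d i (List.range (board.getD i []).length) m
        = pvFoldA (pvRowMatches i (board.getD i []) d) m :=
      pv_markRowA_eq (board.getD i []) d i (List.range (board.getD i []).length) m
    unfold pvMarkBoardA
    rw [hrow, List.flatMap_cons, pv_foldA_append]
    cases hres : pvFoldA (pvRowMatches i (board.getD i []) d) m with
    | error e => rfl
    | ok m' => exact ih m'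

-- the positions dictionary holds exactly the matching cells, in row-major order
theorem pv_dict_row (row : List Int) (i : Nat) (v : Int) (js : List Nat) :
    ∀ d0 : PySem.Dict Int (List (Nat × Nat)),
    ((js.foldl (fun d j =>
        d.insert (row.getD j 0) (d.getD (row.getD j 0) [] ++ [(i, j)])) d0).getD v [])
      = d0.getD v [] ++ js.filterMap (fun j => if row.getD j 0 = v then some (i, j) else none) := by
  induction js with
  | nil => simp
  | cons j js ih =>
    intro d0
    rw [List.foldl_cons, ih, PySem.Dict.getD_insert]
    by_cases hv : row.getD j 0 = v
    · rw [if_pos hv.symm, hv,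
        show (j :: js).filterMap (fun j => if row.getD j 0 = v then some (i, j) else none)
          = (i, j) :: js.filterMap (fun j => if row.getD j 0 = v then some (i, j) else none) by
            rw [List.filterMap_cons, if_pos hv]]
      simp [List.append_assoc]
    · rw [if_neg (fun h => hv h.symm),
        show (j :: js).filterMap (fun j => if row.getD j 0 = v then some (i, j) else none)
          = js.filterMap (fun j => if row.getD j 0 = v then some (i, j) else none) by
            rw [List.filterMap_cons, if_neg hv]]

theorem pv_dict_board (board : List (List Int)) (v : Int) (is : List Nat) :
    ∀ d0 : PySem.Dict Int (List (Nat × Nat)),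
    ((is.foldl (fun d i =>
        (List.range (board.getD i []).length).foldl (fun d j =>
          d.insert ((board.getD i []).getD j 0)
            (d.getD ((board.getD i []).getD j 0) [] ++ [(i, j)])) d) d0).getD v [])
      = d0.getD v [] ++ is.flatMap (fun i => pvRowMatches i (board.getD i []) v) := by
  induction is with
  | nil => simp
  | cons i is ih =>
    intro d0
    simp only [List.foldl_cons, List.flatMap_cons, ih, pv_dict_row]
    simp [pvRowMatches]

theorem pv_dict (board : List (List Int)) (v : Int) :
    (pvPositions board).getD v [] = pvMatches board v := by
  unfold pvPositions pvMatches
  rw [pv_dict_board]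
  rfl

theorem pv_mem_matches {board : List (List Int)} {d : Int} {p : Nat × Nat}
    (h : p ∈ pvMatches board d) :
    p.1 < board.length ∧ p.2 < (board.getD p.1 []).length
      ∧ (board.getD p.1 []).getD p.2 0 = d := by
  simp only [pvMatches, pvRowMatches, List.mem_flatMap, List.mem_range,
    List.mem_filterMap] at h
  obtain ⟨i, hi, j, hj, heq⟩ := h
  by_cases hv : (board.getD i []).getD j 0 = d
  · rw [if_pos hv] at heq
    obtain rfl : (i, j) = p := by simpa using heq
    exact ⟨hi, hj, hv⟩
  · rw [if_neg hv] at heq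
    simp at heq

-- the per-draw scans agree and preserve the counter invariant
theorem pv_markEq (ps : List (Nat × Nat)) :
    ∀ m rc cc, pvInv m rc cc → (∀ p ∈ ps, p.1 < 5 ∧ p.2 < 5) →
    (∃ m' st', pvFoldA ps m = .error m' ∧ pvMarkPosB ps (m, rc, cc) = .error st'
        ∧ st'.1 = m') ∨
    (∃ m', pvFoldA ps m = .ok m'
        ∧ pvMarkPosB ps (m, rc, cc) = .ok (m', pvRcOf m', pvCcOf m') ∧ pvShape m') := by
  induction ps with
  | nil =>
    intro m rc cc hInv _
    obtain ⟨hs, hrc, hcc⟩ := hInv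
    right
    exact ⟨m, rfl, by subst hrc hcc; rfl, hs⟩
  | cons p ps ih =>
    intro m rc cc hInv hb
    obtain ⟨i, j⟩ := p
    obtain ⟨hs, hrc, hcc⟩ := hInv
    obtain ⟨hi, hj⟩ := hb (i, j) (List.mem_cons_self ..)
    have hb' : ∀ q ∈ ps, q.1 < 5 ∧ q.2 < 5 := fun q hq => hb q (List.mem_cons_of_mem _ hq)
    by_cases hc : pvCell m i j
    · -- already marked: the cell write is a no-op in both programs
      have hset : pvSetCell m i j = m := by
        have hrl : (m.getD i []).length = 5 := pv_row_len hs hi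
        have hi' : i < m.length := by have := hs.1; omega
        unfold pvSetCell
        rw [pv_set_getD_self (by omega) hc, pv_getD_eq_getElem hi']
        exact List.set_getElem_self hi'
      have hchk : fnCheckComplete m i j
          = ((pvRcOf m).getD i 0 == 5 || (pvCcOf m).getD j 0 == 5) := pv_check hs hi hj
      simp only [pvFoldA, pvMarkPosB, hc, if_true, hset, hrc, hcc]
      rw [hchk]
      split
      · exact Or.inl ⟨m, (m, pvRcOf m, pvCcOf m), rfl, rfl, rfl⟩
      · exact ih m (pvRcOf m) (pvCcOf m) ⟨hs, rfl, rfl⟩ hb'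
    · -- new mark: counters track the marked matrix
      have hs' : pvShape (pvSetCell m i j) := pv_shape_set hs hi hj
      have hrc' := pv_rc_set hs hi hj (by simpa using hc)
      have hcc' := pv_cc_set hs hi hj (by simpa using hc)
      have hchk : fnCheckComplete (pvSetCell m i j) i j
          = ((pvRcOf (pvSetCell m i j)).getD i 0 == 5
             || (pvCcOf (pvSetCell m i j)).getD j 0 == 5) := pv_check hs' hi hj
      simp only [pvFoldA, pvMarkPosB, hc, if_false, Bool.false_eq_true, hrc, hcc]
      rw [hrc', hcc', hchk]
      split
      · exact Or.inl ⟨pvSetCell m i j,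
          (pvSetCell m i j, pvRcOf (pvSetCell m i j), pvCcOf (pvSetCell m i j)),
          rfl, rfl, rfl⟩
      · exact ih (pvSetCell m i j) _ _ ⟨hs', rfl, rfl⟩ hb'

-- the draw loops agree
theorem pv_loopEq (board : List (List Int)) (draws : List Int) (mc : Int)
    (ds : List Int) :
    ∀ (c : Int) m rc cc, pvInv m rc cc →
    (∀ d ∈ ds.take (mc - 1 - c).toNat, ∀ p ∈ pvMatches board d, p.1 < 5 ∧ p.2 < 5) →
    pvLoopA board draws mc ds c m
      = pvLoopB board draws mc (pvPositions board) ds c (m, rc, cc) := by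
  induction ds with
  | nil => intro c m rc cc _ _; rfl
  | cons d ds ih =>
    intro c m rc cc hInv hb
    by_cases h : mc ≤ c + 1
    · simp only [pvLoopA, pvLoopB, if_pos h]
    · have hn : 1 ≤ (mc - 1 - c).toNat := by omega
      have hd : d ∈ (d :: ds).take (mc - 1 - c).toNat := by
        obtain ⟨n, hn'⟩ : ∃ n, (mc - 1 - c).toNat = n + 1 := ⟨(mc - 1 - c).toNat - 1, by omega⟩
        rw [hn', List.take_succ_cons]
        exact List.mem_cons_self ..
      have hbd := hb d hd
      simp only [pvLoopA, pvLoopB, if_neg h]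
      rw [pv_dict board d, pv_markBoardA_eq]
      have hmm : (List.range board.length).flatMap
          (fun i => pvRowMatches i (board.getD i []) d) = pvMatches board d := rfl
      rw [hmm]
      rcases pv_markEq (pvMatches board d) m rc cc hInv hbd with
        ⟨m', st', hA, hB, hst⟩ | ⟨m', hA, hB, hs'⟩
      · rw [hA, hB]
        show (c + 1, board, m', (PySem.List.pyGet? draws (c + 1)).getD 0)
          = (c + 1, board, st'.1, (PySem.List.pyGet? draws (c + 1)).getD 0)
        rw [hst]
      · rw [hA, hB]
        apply ih (c + 1) m' (pvRcOf m') (pvCcOf m') ⟨hs', rfl, rfl⟩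
        intro d' hd' p hp
        have hstep : (mc - 1 - c).toNat = (mc - 1 - (c + 1)).toNat + 1 := by omega
        have : d' ∈ (d :: ds).take (mc - 1 - c).toNat := by
          rw [hstep, List.take_succ_cons]
          exact List.mem_cons_of_mem _ hd'
        exact hb d' this p hp

-- ===== VERDICT (by name: the statement is the Claim_ definition above) =====
theorem fn_search_and_mark_spec : Claim_equal_fn_search_and_mark := by
  intro board draws mc hDom hPre
  unfold Spec_fn_search_and_mark fn_search_and_mark fn_search_and_mark_alt
  apply pv_loopEq
  · exact ⟨⟨by decide, by decide⟩, by decide, by decide⟩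
  · intro d hd p hp
    obtain ⟨h1, h2, h3⟩ := pv_mem_matches hp
    by_contra hcon
    have h5 : 5 ≤ p.1 ∨ 5 ≤ p.2 := by omega
    have hnot := hPre.2.1 p.1 h1 p.2 h2 h5
    apply hnot
    rw [h3]
    simpa [pvPrefix] using hd
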